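-- pv_equiv track=rewrite | github.com/MichalMotylinski/Codewars | 7kyu/drone_fly_by.py | fly_by
-- ===== SOURCE A (Python) =====
-- def fly_by(lamps, drone):
--     i = 0
--     lamps_on = ""
--     while i < len(lamps):
--         if i < len(drone):
--             lamps_on = lamps_on + "o"
--         else:
--             lamps_on = lamps_on + "x"
--         i += 1
--     return lamps_on
-- ===== SOURCE B (Python) =====
-- def fly_by(lamps, drone):
--     k = min(len(lamps), len(drone))
--     return "o" * k + "x" * (len(lamps) - k)
-- ===== Notes on version B (the rewrite author's own statement) =====
-- stated objective: faster
-- what changed: Replaces the index-counting while loop with per-character string concatenation by a closed-form string: k = min(len(lamps), len(drone)) lit lamps, then 'o'*k + 'x'*(len(lamps)-k).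
import Mathlib
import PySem

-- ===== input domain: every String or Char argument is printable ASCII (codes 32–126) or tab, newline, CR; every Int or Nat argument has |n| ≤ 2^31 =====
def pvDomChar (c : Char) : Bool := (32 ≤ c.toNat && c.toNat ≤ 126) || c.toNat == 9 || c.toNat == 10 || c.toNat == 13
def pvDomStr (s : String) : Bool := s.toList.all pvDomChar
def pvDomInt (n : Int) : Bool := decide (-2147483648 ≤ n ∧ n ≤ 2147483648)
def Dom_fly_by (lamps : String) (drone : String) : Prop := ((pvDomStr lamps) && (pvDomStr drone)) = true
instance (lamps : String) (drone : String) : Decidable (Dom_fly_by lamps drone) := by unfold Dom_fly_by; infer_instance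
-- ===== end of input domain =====

-- B replaces A's per-index while loop with the closed form "o"*min(len lamps, len drone) ++ "x"*(rest): simpler, no loop.

-- ===== PORT A =====
-- the while loop: i counts up, one character appended per iteration
def flyLoopA (n m i : Nat) (acc : List Char) : List Char :=
  if i < n then
    flyLoopA n m (i + 1) (acc ++ [if i < m then 'o' else 'x'])
  else acc
termination_by n - i

def fly_by (lamps : String) (drone : String) : String :=
  String.mk (flyLoopA lamps.toList.length drone.toList.length 0 [])

-- ===== PORT B =====
def fly_by_alt (lamps : String) (drone : String) : String :=
  let n := lamps.toList.length
  let k := min n drone.toList.length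
  String.mk (List.replicate k 'o' ++ List.replicate (n - k) 'x')

-- ===== PRECONDITION & SPEC =====
def Spec_fly_by (lamps : String) (drone : String) (out : String) : Prop := out = fly_by_alt lamps drone
instance (lamps : String) (drone : String) (out : String) : Decidable (Spec_fly_by lamps drone out) := by unfold Spec_fly_by; infer_instance

-- ===== CLAIM (what is proved, stated in full; the proofs are below) =====
def Claim_equal_fly_by : Prop := ∀ (lamps : String) (drone : String), Dom_fly_by lamps drone → Spec_fly_by lamps drone (fly_by lamps drone)

-- ===== LEMMAS AND PROOFS =====
theorem flyLoopA_eq (n m : Nat) : ∀ (fuel i : Nat) (acc : List Char), n - i = fuel →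
    flyLoopA n m i acc
      = acc ++ (List.replicate (min n m - i) 'o' ++ List.replicate ((n - i) - (min n m - i)) 'x') := by
  intro fuel
  induction fuel with
  | zero =>
    intro i acc h
    unfold flyLoopA
    have hni : ¬ i < n := by omega
    have h1 : min n m - i = 0 := by omega
    simp [hni, h, h1]
  | succ k ih =>
    intro i acc h
    have hi : i < n := by omega
    unfold flyLoopA
    rw [if_pos hi, ih (i + 1) _ (by omega)]
    rw [List.append_assoc]
    by_cases him : i < m
    · have h1 : min n m - i = (min n m - (i + 1)) + 1 := by omega
      have h2 : n - (i + 1) - (min n m - (i + 1)) = n - i - (min n m - (i + 1) + 1) := by omega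
      rw [h1, h2]
      simp [him, List.replicate_succ]
    · have h1 : min n m - i = 0 := by omega
      have h1' : min n m - (i + 1) = 0 := by omega
      have h2 : n - i = (n - (i + 1)) + 1 := by omega
      rw [h1, h1', h2]
      simp [him, List.replicate_succ]

-- ===== VERDICT (by name: the statement is the Claim_ definition above) =====
theorem fly_by_spec : Claim_equal_fly_by := by
  intro lamps drone _
  unfold Spec_fly_by fly_by fly_by_alt
  rw [flyLoopA_eq _ _ _ 0 [] rfl]
  simp
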